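-- pv_equiv track=rewrite | github.com/mtsilvasan/LobaListas | cartasSirve.py | escaleritas
-- ===== SOURCE A (Python) =====
-- def escaleritas(lista):
--     elem = []
--     esca = []
--     final = []
--     for i in range(len(lista)-1):
--         elem.append(int(lista[i+1][1])-int((lista[i][1])))
--     i = 0
--     for e in elem:
--         if e in (1,2):
--             if lista[i] not in esca:
--                 esca.append(lista[i])
--             esca.append(lista[i+1])
--         else:
--             if (len(esca))>0:
--                 final.append(esca)
--                 esca = []
--         i+=1
--     if len(esca)> 1:
--         final.append(esca)
--     if len(final)== 0:
--         return([])
--     else: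
--         return(final[0])
-- ===== SOURCE B (Python) =====
-- def escaleritas(lista):
--     # Single early-terminating scan: return the first staircase run directly.
--     if len(lista) < 2:
--         return []
--     if int(lista[1][1]) - int(lista[0][1]) in (1, 2):
--         return [lista[0]] + _extiende(lista[1:])
--     return escaleritas(lista[1:])
--
-- def _extiende(lista):
--     if len(lista) >= 2 and int(lista[1][1]) - int(lista[0][1]) in (1, 2):
--         return [lista[0]] + _extiende(lista[1:])
--     return [lista[0]]
-- ===== Notes on version B (the rewrite author's own statement) =====
-- stated objective: simpler
-- what changed: Replaced A's precomputed difference table plus all-runs accumulator (of which only final[0] is used) by a direct early-terminating recursive scan that returns the first staircase run as soon as it ends.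
import Mathlib
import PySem

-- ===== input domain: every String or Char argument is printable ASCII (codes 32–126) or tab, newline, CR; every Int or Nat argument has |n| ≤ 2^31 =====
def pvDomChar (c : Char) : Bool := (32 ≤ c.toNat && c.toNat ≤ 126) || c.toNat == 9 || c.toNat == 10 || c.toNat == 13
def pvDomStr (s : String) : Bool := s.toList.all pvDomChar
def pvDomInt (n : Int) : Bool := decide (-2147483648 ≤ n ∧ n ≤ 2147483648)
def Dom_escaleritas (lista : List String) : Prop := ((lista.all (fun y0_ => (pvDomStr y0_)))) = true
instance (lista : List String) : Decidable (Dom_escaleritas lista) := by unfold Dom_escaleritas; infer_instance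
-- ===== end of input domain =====

-- B is a simpler single early-terminating recursive scan that returns the first
-- staircase run directly, with no difference table and no all-runs accumulator.

-- int(s[1]) for a string s; the default 0 is only reached where Python raises (outside Pre_)
def pyInt1 (s : String) : Int :=
  ((PySem.Str.pyGet? s 1).bind (fun c => PySem.Int.ofChars? [c])).getD 0

-- ===== PORT A =====
-- the body of A's second for-loop (state: esca, final, i)
def pvLoopA (lista : List String) (st : List String × List (List String) × Int) (e : Int) :
    List String × List (List String) × Int :=
  let esca := st.1
  let final := st.2.1
  let i := st.2.2
  if e = 1 ∨ e = 2 then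
    ((if PySem.List.pyGetD lista i "" ∈ esca then esca
      else esca ++ [PySem.List.pyGetD lista i ""]) ++ [PySem.List.pyGetD lista (i + 1) ""],
     final, i + 1)
  else
    if esca.length > 0 then ([], final ++ [esca], i + 1)
    else (esca, final, i + 1)

def escaleritas (lista : List String) : List String :=
  let elem : List Int :=
    (PySem.List.pyRange 0 ((lista.length : Int) - 1) 1).foldl
      (fun acc i =>
        acc ++ [pyInt1 (PySem.List.pyGetD lista (i + 1) "") - pyInt1 (PySem.List.pyGetD lista i "")]) []
  let st := elem.foldl (pvLoopA lista) ([], [], 0)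
  let final := if st.1.length > 1 then st.2.1 ++ [st.1] else st.2.1
  if final.length = 0 then [] else PySem.List.pyGetD final 0 []

-- ===== PORT B =====
def pvExtiende : List String → List String
  | x :: y :: r =>
    if pyInt1 y - pyInt1 x = 1 ∨ pyInt1 y - pyInt1 x = 2 then x :: pvExtiende (y :: r) else [x]
  | [x] => [x]
  | [] => []

def escaleritas_alt : List String → List String
  | x :: y :: r =>
    if pyInt1 y - pyInt1 x = 1 ∨ pyInt1 y - pyInt1 x = 2 then x :: pvExtiende (y :: r)
    else escaleritas_alt (y :: r)
  | _ => []

-- ===== PRECONDITION & SPEC =====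
-- Pre_ excludes exactly the inputs where Python A raises: with ≥ 2 cards, every card
-- needs a second character and that character must be a decimal digit (int() succeeds).
def Pre_escaleritas (lista : List String) : Prop :=
  lista.length ≤ 1 ∨ ∀ s ∈ lista, 2 ≤ s.toList.length ∧ (s.toList.getD 1 ' ').isDigit = true

instance (lista : List String) : Decidable (Pre_escaleritas lista) := by
  unfold Pre_escaleritas; infer_instance

def pvWitness_escaleritas : List String := ["a1", "b2", "c3", "x9", "y0"]

def Spec_escaleritas (lista : List String) (out : List String) : Prop := out = escaleritas_alt lista
instance (lista : List String) (out : List String) : Decidable (Spec_escaleritas lista out) := by unfold Spec_escaleritas; infer_instance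

-- ===== CLAIM (what is proved, stated in full; the proofs are below) =====
def Claim_equal_escaleritas : Prop := ∀ (lista : List String), Dom_escaleritas lista → Pre_escaleritas lista → Spec_escaleritas lista (escaleritas lista)

-- ===== LEMMAS AND PROOFS =====

-- the adjacent pairs of the list
def pvPairs (xs : List String) : List (String × String) := xs.zip xs.tail

-- A's grouping step, freed of the index bookkeeping
def pvStep (st : List String × List (List String)) (p : String × String) :
    List String × List (List String) :=
  if pyInt1 p.2 - pyInt1 p.1 = 1 ∨ pyInt1 p.2 - pyInt1 p.1 = 2 then
    ((if p.1 ∈ st.1 then st.1 else st.1 ++ [p.1]) ++ [p.2], st.2)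
  else
    if st.1.length > 0 then ([], st.2 ++ [st.1]) else (st.1, st.2)

-- A's tail: close the last run and take the first
def pvAns (st : List String × List (List String)) : List String :=
  let final := if st.1.length > 1 then st.2 ++ [st.1] else st.2
  if final.length = 0 then [] else PySem.List.pyGetD final 0 []

theorem pvDropLastLast {α : Type} (l : List α) (x : α) (h : l.getLast? = some x) :
    l.dropLast ++ [x] = l := by
  have hne : l ≠ [] := by rintro rfl; simp at h
  have := List.getLast?_eq_some_getLast hne
  rw [this] at h
  obtain rfl : x = l.getLast hne := by injection h with h'; exact h'.symm
  exact List.dropLast_append_getLast hne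

theorem pvLastMem {α : Type} (l : List α) (x : α) (h : l.getLast? = some x) : x ∈ l := by
  have := pvDropLastLast l x h
  rw [← this]; simp

theorem pvHeadFix (ps : List (String × String)) (esca : List String)
    (f : List (List String)) (hf : f ≠ []) :
    pvAns (ps.foldl pvStep (esca, f)) = f.headD [] := by
  induction ps generalizing esca f with
  | nil =>
    obtain ⟨a, f', rfl⟩ : ∃ a f', f = a :: f' := by
      cases f with
      | nil => exact absurd rfl hf
      | cons a f' => exact ⟨a, f', rfl⟩
    simp only [List.foldl_nil, pvAns]
    split_ifs with h1 h2 <;> simp_all [PySem.List.pyGetD_zero]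
  | cons p ps ih =>
    simp only [List.foldl_cons]
    by_cases h1 : pyInt1 p.2 - pyInt1 p.1 = 1 ∨ pyInt1 p.2 - pyInt1 p.1 = 2
    · rw [show pvStep (esca, f) p = ((if p.1 ∈ esca then esca else esca ++ [p.1]) ++ [p.2], f) by
        simp [pvStep, h1]]
      exact ih _ _ hf
    · by_cases h2 : esca.length > 0
      · rw [show pvStep (esca, f) p = ([], f ++ [esca]) by simp [pvStep, h1, h2]]
        rw [ih _ _ (by simp)]
        cases f with
        | nil => exact absurd rfl hf
        | cons a f' => simp
      · rw [show pvStep (esca, f) p = (esca, f) by simp [pvStep, h1, h2]]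
        exact ih _ _ hf

theorem pvExtiende_cons_cons (x y : String) (r : List String) :
    pvExtiende (x :: y :: r) =
      if pyInt1 y - pyInt1 x = 1 ∨ pyInt1 y - pyInt1 x = 2 then x :: pvExtiende (y :: r)
      else [x] := rfl

theorem escaleritas_alt_cons_cons (x y : String) (r : List String) :
    escaleritas_alt (x :: y :: r) =
      if pyInt1 y - pyInt1 x = 1 ∨ pyInt1 y - pyInt1 x = 2 then x :: pvExtiende (y :: r)
      else escaleritas_alt (y :: r) := rfl

theorem pvExt (r : List String) (x : String) (acc : List String)
    (hlast : acc.getLast? = some x) (hlen : 2 ≤ acc.length) :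
    pvAns ((pvPairs (x :: r)).foldl pvStep (acc, [])) = acc.dropLast ++ pvExtiende (x :: r) := by
  induction r generalizing x acc with
  | nil =>
    have h1 : acc.length > 1 := by omega
    show pvAns (([] : List (String × String)).foldl pvStep (acc, [])) = _
    simp [pvAns, pvExtiende, h1, PySem.List.pyGetD_zero]
    exact (pvDropLastLast acc x hlast).symm
  | cons y r' ih =>
    show pvAns ((((x, y) :: pvPairs (y :: r')).foldl pvStep (acc, []))) = _
    simp only [List.foldl_cons]
    rw [pvExtiende_cons_cons]
    by_cases hc : pyInt1 y - pyInt1 x = 1 ∨ pyInt1 y - pyInt1 x = 2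
    · rw [show pvStep (acc, []) (x, y) = (acc ++ [y], []) by
        simp [pvStep, hc, pvLastMem acc x hlast]]
      rw [ih y (acc ++ [y]) (by simp) (by simp; omega)]
      rw [List.dropLast_concat, if_pos hc]
      rw [show acc.dropLast ++ (x :: pvExtiende (y :: r')) =
        (acc.dropLast ++ [x]) ++ pvExtiende (y :: r') by simp]
      rw [pvDropLastLast acc x hlast]
    · rw [show pvStep (acc, []) (x, y) = ([], [] ++ [acc]) by
        simp [pvStep, hc, show acc.length > 0 by omega]]
      rw [pvHeadFix _ _ _ (by simp), if_neg hc, pvDropLastLast acc x hlast]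
      simp

theorem pvTop (xs : List String) :
    pvAns ((pvPairs xs).foldl pvStep ([], [])) = escaleritas_alt xs := by
  induction xs with
  | nil => simp [pvPairs, pvAns, escaleritas_alt]
  | cons x xs ih =>
    cases xs with
    | nil => simp [pvPairs, pvAns, escaleritas_alt]
    | cons y r =>
      show pvAns ((((x, y) :: pvPairs (y :: r)).foldl pvStep ([], []))) = _
      simp only [List.foldl_cons]
      rw [escaleritas_alt_cons_cons]
      by_cases hc : pyInt1 y - pyInt1 x = 1 ∨ pyInt1 y - pyInt1 x = 2
      · rw [show pvStep ([], []) (x, y) = ([x, y], []) by simp [pvStep, hc]]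
        rw [pvExt r y [x, y] (by simp) (by simp), if_pos hc]
        simp
      · rw [show pvStep ([], []) (x, y) = ([], []) by simp [pvStep, hc]]
        rw [ih, if_neg hc]

theorem pvPairs_length (xs : List String) : (pvPairs xs).length = xs.length - 1 := by
  simp [pvPairs, List.length_zip, List.length_tail]

theorem pvPairs_getElem (xs : List String) (k : Nat) (hk : k < (pvPairs xs).length) :
    (pvPairs xs)[k] = (xs[k]'(by rw [pvPairs_length] at hk; omega),
                       xs[k + 1]'(by rw [pvPairs_length] at hk; omega)) := by
  have h1 : k < xs.length := by rw [pvPairs_length] at hk; omega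
  have h2 : k < xs.tail.length := by simp [List.length_tail]; rw [pvPairs_length] at hk; omega
  simp [pvPairs, List.getElem_zip, List.getElem_tail]

theorem pvElem_eq (lista : List String) :
    (PySem.List.pyRange 0 ((lista.length : Int) - 1) 1).foldl
      (fun acc i =>
        acc ++ [pyInt1 (PySem.List.pyGetD lista (i + 1) "") - pyInt1 (PySem.List.pyGetD lista i "")]) []
    = (pvPairs lista).map (fun p => pyInt1 p.2 - pyInt1 p.1) := by
  rw [PySem.List.foldl_append_singleton_eq_map]
  apply List.ext_getElem
  · simp [PySem.List.length_pyRange_one, pvPairs_length]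
  · intro k h1 h2
    simp only [List.nil_append]
    rw [List.getElem_map, List.getElem_map, PySem.List.getElem_pyRange_one, pvPairs_getElem]
    have hk : k < lista.length - 1 := by
      simpa [pvPairs_length] using h2
    have e1 : (0 : Int) + (k : Int) + 1 = ((k + 1 : Nat) : Int) := by push_cast; ring
    have e0 : (0 : Int) + (k : Int) = ((k : Nat) : Int) := by omega
    rw [e1, e0, PySem.List.pyGetD_natCast, PySem.List.pyGetD_natCast,
      List.getD_eq_getElem _ _ (by omega), List.getD_eq_getElem _ _ (by omega)]

theorem pvLoop_eq (lista : List String) (ps : List (String × String)) (k : Nat)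
    (esca : List String) (final : List (List String))
    (h : (pvPairs lista).drop k = ps) :
    (ps.map (fun p => pyInt1 p.2 - pyInt1 p.1)).foldl (pvLoopA lista) (esca, final, (k : Int))
    = ((ps.foldl pvStep (esca, final)).1, (ps.foldl pvStep (esca, final)).2,
       ((k + ps.length : Nat) : Int)) := by
  induction ps generalizing k esca final with
  | nil => simp
  | cons p ps ih =>
    have hk : k < (pvPairs lista).length := by
      by_contra hge
      rw [List.drop_eq_nil_of_le (by omega)] at h
      simp at h
    have hdrop := List.drop_eq_getElem_cons hk
    rw [hdrop] at h
    obtain ⟨hp, hps⟩ : (pvPairs lista)[k] = p ∧ (pvPairs lista).drop (k + 1) = ps :=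
      ⟨by injection h, by injection h⟩
    have hk1 : k < lista.length := by rw [pvPairs_length] at hk; omega
    have hk2 : k + 1 < lista.length := by rw [pvPairs_length] at hk; omega
    have hp1 : PySem.List.pyGetD lista (k : Int) "" = p.1 := by
      rw [PySem.List.pyGetD_natCast, List.getD_eq_getElem _ _ hk1, ← hp, pvPairs_getElem]
    have hp2 : PySem.List.pyGetD lista ((k : Int) + 1) "" = p.2 := by
      rw [show ((k : Int) + 1) = ((k + 1 : Nat) : Int) by push_cast; ring,
        PySem.List.pyGetD_natCast, List.getD_eq_getElem _ _ hk2, ← hp, pvPairs_getElem]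
    have hstep : pvLoopA lista (esca, final, (k : Int)) (pyInt1 p.2 - pyInt1 p.1)
        = ((pvStep (esca, final) p).1, (pvStep (esca, final) p).2, ((k + 1 : Nat) : Int)) := by
      simp only [pvLoopA, pvStep, hp1, hp2]
      split_ifs <;> simp
    simp only [List.map_cons, List.foldl_cons]
    rw [hstep, ih (k + 1) _ _ hps]
    simp only [Prod.mk.eta, List.length_cons, Prod.mk.injEq]
    refine ⟨trivial, trivial, ?_⟩
    push_cast; ring

theorem pvBridgeA (lista : List String) :
    escaleritas lista = pvAns ((pvPairs lista).foldl pvStep ([], [])) := by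
  unfold escaleritas
  simp only [pvElem_eq]
  rw [show ((0 : Int)) = ((0 : Nat) : Int) by simp]
  rw [pvLoop_eq lista (pvPairs lista) 0 [] [] rfl]
  simp [pvAns]

-- ===== VERDICT (by name: the statement is the Claim_ definition above) =====
theorem escaleritas_spec : Claim_equal_escaleritas := by
  intro lista _ _
  unfold Spec_escaleritas
  rw [pvBridgeA, pvTop]
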